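-- pv_equiv track=rewrite | github.com/mohoc/M2-misc | code/graph_op.py | find_eps_id
-- ===== SOURCE A (Python) =====
-- def find_eps_id(G):
-- 	nodes, _ = G
-- 	n = len(nodes)
-- 	eps_id = -1
-- 	found_eps = False
-- 	for i in range(n):
-- 		if nodes[i] == "":
-- 			if found_eps:
-- 				raise IndexError
-- 			else:
-- 				eps_id = i
-- 				found_eps = True
-- 	assert found_eps
-- 	return eps_id
-- ===== SOURCE B (Python) =====
-- def find_eps_id(G):
--     nodes, _ = G
--     first = nodes.index("")                       # ValueError if there is no empty node
--     last = len(nodes) - 1 - nodes[::-1].index("")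
--     if first != last:
--         raise IndexError                          # more than one empty node
--     return first
-- ===== Notes on version B (the rewrite author's own statement) =====
-- stated objective: alternative
-- what changed: Instead of a single forward scan with a running eps_id/found_eps flag, B locates the first occurrence with nodes.index('') and the last occurrence by searching the reversed list, and raises iff the two positions differ; no per-element state is maintained.
import Mathlib
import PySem

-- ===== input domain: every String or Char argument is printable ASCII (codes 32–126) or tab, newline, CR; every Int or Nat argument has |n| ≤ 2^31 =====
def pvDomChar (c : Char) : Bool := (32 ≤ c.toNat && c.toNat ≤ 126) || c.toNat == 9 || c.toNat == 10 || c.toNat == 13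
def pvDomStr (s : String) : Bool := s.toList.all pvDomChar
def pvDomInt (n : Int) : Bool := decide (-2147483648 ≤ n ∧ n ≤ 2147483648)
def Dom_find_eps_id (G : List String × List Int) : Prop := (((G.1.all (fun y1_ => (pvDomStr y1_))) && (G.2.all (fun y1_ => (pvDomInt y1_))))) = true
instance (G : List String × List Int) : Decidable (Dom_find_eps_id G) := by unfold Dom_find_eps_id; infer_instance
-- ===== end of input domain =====

-- B replaces A's stateful forward scan (eps_id/found_eps flag) by two directed searches:
-- first occurrence via index, last occurrence via the reversed list; raise iff they differ.

-- ===== PORT A =====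
-- loop body of A's 'for i in range(n)': state is (eps_id, found_eps);
-- the 'raise IndexError' branch never runs inside Pre_ (its state value is irrelevant there).
def fA_find_eps_id (nodes : List String) (s : Int × Bool) (i : Nat) : Int × Bool :=
  if nodes.getD i "" == "" then
    if s.2 then s else ((i : Int), true)
  else s

def find_eps_id (G : List String × List Int) : Int :=
  let nodes := G.1
  let n := nodes.length
  let st := (List.range n).foldl (fA_find_eps_id nodes) (-1, false)
  -- 'assert found_eps' cannot fail inside Pre_
  st.1

-- ===== PORT B =====
def find_eps_id_alt (G : List String × List Int) : Int :=
  let nodes := G.1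
  -- nodes.index("") : ValueError (no empty node) is excluded by Pre_
  let first : Int := ((PySem.List.index? nodes "").getD 0 : Nat)
  -- nodes[::-1] (PySem.List.slice? … (-1) = some reverse), then .index("")
  let rev := (PySem.List.slice? nodes none none (-1)).getD []
  let last : Int := (nodes.length : Int) - 1 - ((PySem.List.index? rev "").getD 0 : Nat)
  if first ≠ last then 0  -- raise IndexError: unreachable inside Pre_
  else first

-- ===== PRECONDITION & SPEC =====
-- Pre_: exactly one empty-string node; otherwise the Python A raises (IndexError / AssertionError).
def Pre_find_eps_id (G : List String × List Int) : Prop := G.1.count "" = 1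
instance (G : List String × List Int) : Decidable (Pre_find_eps_id G) := by unfold Pre_find_eps_id; infer_instance
def pvWitness_find_eps_id : (List String × List Int) := (["a", "", "b"], [0, 1])

def Spec_find_eps_id (G : List String × List Int) (out : Int) : Prop := out = find_eps_id_alt G
instance (G : List String × List Int) (out : Int) : Decidable (Spec_find_eps_id G out) := by unfold Spec_find_eps_id; infer_instance

-- ===== CLAIM =====
def Claim_equal_find_eps_id : Prop := ∀ (G : List String × List Int), Dom_find_eps_id G → Pre_find_eps_id G → Spec_find_eps_id G (find_eps_id G)

-- ===== LEMMAS AND PROOFS =====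

-- first index of "" in a list, if any (characterises A's loop state)
def firstIdx? : List String → Option Nat
  | [] => none
  | x :: xs => if x = "" then some 0 else (firstIdx? xs).map (· + 1)

theorem firstIdx?_append_singleton (l : List String) (x : String) :
    firstIdx? (l ++ [x]) = (firstIdx? l).or (if x = "" then some l.length else none) := by
  induction l with
  | nil =>
    simp only [List.nil_append, firstIdx?, Option.none_or, List.length_nil,
      Option.map_none]
  | cons y ys ih =>
    by_cases hy : y = ""
    · simp [firstIdx?, hy]
    · simp only [List.cons_append, firstIdx?, hy, if_false, ih, Option.map_or,
        List.length_cons]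
      congr 1
      split <;> simp

theorem foldA_spec (nodes : List String) :
    ∀ n, n ≤ nodes.length →
      (List.range n).foldl (fA_find_eps_id nodes) (-1, false)
        = (match firstIdx? (nodes.take n) with
           | some j => ((j : Int), true)
           | none => (-1, false)) := by
  intro n
  induction n with
  | zero => intro _; simp [firstIdx?]
  | succ m ih =>
    intro hle
    have hm : m < nodes.length := Nat.lt_of_succ_le hle
    have hget : nodes.take (m + 1) = nodes.take m ++ [nodes.getD m ""] := by
      rw [List.take_add_one]
      simp [List.getD, List.getElem?_eq_getElem hm]
    rw [List.range_succ, List.foldl_append, ih (Nat.le_of_lt hm), hget,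
        firstIdx?_append_singleton]
    have hlen : (nodes.take m).length = m := List.length_take_of_le (Nat.le_of_lt hm)
    cases h : firstIdx? (nodes.take m) with
    | some j =>
      simp only [List.foldl_cons, List.foldl_nil, fA_find_eps_id]
      split <;> simp
    | none =>
      simp only [List.foldl_cons, List.foldl_nil, fA_find_eps_id, Option.none_or]
      by_cases he : nodes.getD m "" = "" <;>
        simp only [List.getD, List.getElem?_eq_getElem hm, Option.getD_some] at he ⊢ <;>
        simp [he]
      omega

-- firstIdx? of a list whose first "" sits after prefix pre
theorem firstIdx?_decomp (pre suf : List String) (hpre : "" ∉ pre) :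
    firstIdx? (pre ++ "" :: suf) = some pre.length := by
  induction pre with
  | nil => simp [firstIdx?]
  | cons x xs ih =>
    have hx : x ≠ "" := fun h => hpre (h ▸ List.mem_cons_self)
    have hxs : "" ∉ xs := fun h => hpre (List.mem_cons_of_mem _ h)
    simp [firstIdx?, hx, ih hxs]

-- index? of a list whose first v sits after prefix l
theorem index?_decomp {α : Type} [BEq α] [LawfulBEq α] (l t : List α) (v : α) (hl : v ∉ l) :
    PySem.List.index? (l ++ v :: t) v = some l.length := by
  induction l with
  | nil => exact PySem.List.index?_cons_self v t
  | cons x xs ih =>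
    have hx : x ≠ v := fun h => hl (h ▸ List.mem_cons_self)
    have hxs : v ∉ xs := fun h => hl (List.mem_cons_of_mem _ h)
    rw [List.cons_append, PySem.List.index?_cons_of_ne _ hx, ih hxs]
    rfl

-- a list counting v exactly once splits as pre ++ v :: suf with v in neither part
theorem decomp_of_count_one {α : Type} [BEq α] [LawfulBEq α] (l : List α) (v : α)
    (h : l.count v = 1) :
    ∃ pre suf, l = pre ++ v :: suf ∧ v ∉ pre ∧ v ∉ suf := by
  have hmem : v ∈ l := List.count_pos_iff.mp (by omega)
  obtain ⟨k, hk⟩ := Option.isSome_iff_exists.mp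
    ((PySem.List.index?_isSome_iff l v).mpr hmem)
  obtain ⟨pre, suf, hsplit, _, hpre⟩ := (PySem.List.index?_eq_some_iff l v k).mp hk
  refine ⟨pre, suf, hsplit, hpre, ?_⟩
  intro hsuf
  have := h
  rw [hsplit, List.count_append, List.count_cons_self] at this
  have h2 : 1 ≤ suf.count v := List.one_le_count_iff.mpr hsuf
  omega

theorem find_eps_id_spec : Claim_equal_find_eps_id := by
  unfold Claim_equal_find_eps_id
  intro G _ hpre
  obtain ⟨ns, es⟩ := G
  unfold Pre_find_eps_id at hpre
  unfold Spec_find_eps_id find_eps_id find_eps_id_alt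
  obtain ⟨pre, suf, hG, hp, hs⟩ := decomp_of_count_one ns "" hpre
  subst hG
  simp only [PySem.List.slice?_none_none_neg_one, Option.getD_some]
  have hrev : (pre ++ "" :: suf).reverse = suf.reverse ++ "" :: pre.reverse := by simp
  have hps : "" ∉ suf.reverse := by simpa using hs
  have hfold := foldA_spec (pre ++ "" :: suf) (pre ++ "" :: suf).length le_rfl
  rw [List.take_length, firstIdx?_decomp pre suf hp] at hfold
  rw [hfold, hrev, index?_decomp suf.reverse pre.reverse "" hps,
      index?_decomp pre suf "" hp]
  simp only [Option.getD_some, List.length_append, List.length_cons,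
    List.length_reverse]
  have : ((pre.length : Int)) = (pre.length + (suf.length + 1) : Nat) - 1 - suf.length := by
    push_cast; ring
  rw [if_neg (by omega)]
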